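-- pv_equiv track=rewrite | github.com/thaReal/MasterChef | codeforces/round_638/balance.py | solve
-- ===== SOURCE A (Python) =====
-- def solve(n):
-- 	p1 = []
-- 	p2 = []
-- 	for i in range(1, n+1):
-- 		if i == n:
-- 			p1.append(pow(2,i))
-- 		elif i < n//2:
-- 			p1.append(pow(2,i))
-- 		else:
-- 			p2.append(pow(2,i))
--
-- 	return sum(p1) - sum(p2)
-- ===== SOURCE B (Python) =====
-- def solve(n):
--     # closed form: geometric series 2^a+...+2^(b-1) = 2^b - 2^a for each range
--     if n <= 0:
--         return 0
--     if n == 1: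
--         return 2
--     return 2 ** (n // 2 + 1) - 2
-- ===== Notes on version B (the rewrite author's own statement) =====
-- stated objective: faster
-- what changed: Replaces the loop that builds two lists of powers of two and sums them with the geometric-series closed form 2^(n//2+1)-2, with direct answers for the trivial small cases.
import Mathlib
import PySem

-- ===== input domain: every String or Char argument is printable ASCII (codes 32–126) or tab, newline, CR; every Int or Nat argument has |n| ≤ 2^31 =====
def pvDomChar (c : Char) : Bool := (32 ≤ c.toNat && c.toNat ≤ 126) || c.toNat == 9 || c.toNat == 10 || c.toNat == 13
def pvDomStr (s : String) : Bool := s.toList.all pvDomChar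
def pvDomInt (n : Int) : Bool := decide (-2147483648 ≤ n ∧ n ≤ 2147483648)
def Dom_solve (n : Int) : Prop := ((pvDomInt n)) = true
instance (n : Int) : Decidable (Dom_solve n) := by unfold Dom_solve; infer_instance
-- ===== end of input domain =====

-- B replaces A's quadratic loop over powers of two by the geometric-series closed form 2^(n//2+1)-2 (faster, asymptotic).


-- ===== PORT A =====
-- one loop step of A: append pow(2,i) to p1 or p2 according to the three branches
def solveStep (n : Int) (st : List Int × List Int) (i : Int) : List Int × List Int :=
  if i = n then (st.1 ++ [(2:Int) ^ i.toNat], st.2)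
  else if i < PySem.Int.floordiv n 2 then (st.1 ++ [(2:Int) ^ i.toNat], st.2)
  else (st.1, st.2 ++ [(2:Int) ^ i.toNat])

def solve (n : Int) : Int :=
  let st := (PySem.List.pyRange 1 (n+1) 1).foldl (solveStep n) ([], [])
  st.1.sum - st.2.sum

-- ===== PORT B =====
def solve_alt (n : Int) : Int :=
  if n ≤ 0 then 0
  else if n = 1 then 2
  else 2 ^ (PySem.Int.floordiv n 2 + 1).toNat - 2

-- ===== PRECONDITION & SPEC =====
def Spec_solve (n : Int) (out : Int) : Prop := out = solve_alt n
instance (n : Int) (out : Int) : Decidable (Spec_solve n out) := by unfold Spec_solve; infer_instance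

-- ===== CLAIM (what is proved, stated in full; the proofs are below) =====
def Claim_equal_solve : Prop := ∀ (n : Int), Dom_solve n → Spec_solve n (solve n)

-- ===== LEMMAS AND PROOFS =====

-- the signed contribution of index i to A's final result
def solveTerm (n i : Int) : Int :=
  if i = n then (2:Int) ^ i.toNat
  else if i < PySem.Int.floordiv n 2 then (2:Int) ^ i.toNat
  else -((2:Int) ^ i.toNat)

theorem solve_fold_sum (n : Int) (l : List Int) (st : List Int × List Int) :
    (l.foldl (solveStep n) st).1.sum - (l.foldl (solveStep n) st).2.sum
      = st.1.sum - st.2.sum + (l.map (solveTerm n)).sum := by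
  induction l generalizing st with
  | nil => simp
  | cons x xs ih =>
    simp only [List.foldl_cons, List.map_cons, List.sum_cons, ih]
    unfold solveStep solveTerm
    split_ifs <;> simp <;> ring

theorem sum_map_neg_int (f : Int → Int) (l : List Int) :
    (l.map (fun i => -(f i))).sum = -((l.map f).sum) := by
  induction l with
  | nil => simp
  | cons x xs ih => simp [ih]; ring

theorem geom_pyRange (a : Int) (ha : 0 ≤ a) (b : Int) (hb : a ≤ b) :
    ((PySem.List.pyRange a b 1).map (fun i => (2:Int) ^ i.toNat)).sum
      = 2 ^ b.toNat - 2 ^ a.toNat := by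
  induction b, hb using Int.le_induction with
  | base =>
    rw [PySem.List.pyRange_one_eq_nil le_rfl]
    simp
  | succ b hb ih =>
    rw [PySem.List.pyRange_one_succ_right hb, List.map_append, List.sum_append, ih]
    have hb0 : 0 ≤ b := le_trans ha hb
    have h1 : (b + 1).toNat = b.toNat + 1 := by omega
    simp [h1, pow_succ]
    ring

theorem solve_eq_alt (n : Int) : solve n = solve_alt n := by
  rcases le_or_gt n 0 with h0 | h0
  · -- empty range
    unfold solve solve_alt
    rw [PySem.List.pyRange_one_eq_nil (by omega)]
    simp [h0]
  · rcases eq_or_lt_of_le (by omega : (1:Int) ≤ n) with h1 | h2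
    · subst h1; decide
    · -- n ≥ 2
      have hfd : PySem.Int.floordiv n 2 = n / 2 := by
        simp [PySem.Int.floordiv, Int.fdiv_eq_ediv_of_nonneg n (by omega : (0:Int) ≤ (2:Int))]
      set h : Int := n / 2 with hh
      have hh1 : 1 ≤ h := by omega
      have hhn : h ≤ n - 1 := by omega
      unfold solve
      rw [solve_fold_sum]
      have hsplit : PySem.List.pyRange 1 (n+1) 1
          = PySem.List.pyRange 1 h 1 ++ PySem.List.pyRange h n 1 ++ [n] := by
        rw [PySem.List.pyRange_one_append 1 h (n+1) (by omega) (by omega),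
            PySem.List.pyRange_one_append h n (n+1) (by omega) (by omega),
            PySem.List.pyRange_one_singleton, List.append_assoc]
      rw [hsplit]
      simp only [List.map_append, List.sum_append]
      have e1 : ((PySem.List.pyRange 1 h 1).map (solveTerm n)).sum
          = 2 ^ h.toNat - 2 ^ (1:Int).toNat := by
        rw [List.map_congr_left (f := solveTerm n)
              (g := fun i => (2:Int) ^ i.toNat)
              (by intro i hi
                  rw [PySem.List.mem_pyRange_one] at hi
                  unfold solveTerm
                  rw [if_neg (by omega), if_pos (by rw [hfd]; omega)])]
        exact geom_pyRange 1 (by omega) h (by omega)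
      have e2 : ((PySem.List.pyRange h n 1).map (solveTerm n)).sum
          = -(2 ^ n.toNat - 2 ^ h.toNat) := by
        rw [List.map_congr_left (f := solveTerm n)
              (g := fun i => -((2:Int) ^ i.toNat))
              (by intro i hi
                  rw [PySem.List.mem_pyRange_one] at hi
                  unfold solveTerm
                  rw [if_neg (by omega), if_neg (by rw [hfd]; omega)])]
        rw [sum_map_neg_int (fun i => (2:Int) ^ i.toNat),
            geom_pyRange h (by omega) n (by omega)]
      have e3 : ([n].map (solveTerm n)).sum = 2 ^ n.toNat := by
        simp [solveTerm]
      rw [e1, e2, e3]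
      unfold solve_alt
      rw [if_neg (by omega), if_neg (by omega), hfd]
      have ht : (h + 1).toNat = h.toNat + 1 := by omega
      have h1t : (2:Int) ^ ((1:Int)).toNat = 2 := by norm_num
      rw [ht, h1t, pow_succ]
      simp only [List.sum_nil]
      ring

-- ===== VERDICT (by name: the statement is the Claim_ definition above) =====
theorem solve_spec : Claim_equal_solve := by
  intro n _
  exact solve_eq_alt n
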